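-- pv_equiv track=rewrite | github.com/etorhub/news | app/routes/settings.py | _all_topics
-- ===== SOURCE A (Python) =====
-- from typing import Any
--
-- def _all_topics(sources: list[dict[str, Any]]) -> list[str]:
--     """Collect unique topic ids from sources."""
--     seen: set[str] = set()
--     result: list[str] = []
--     for s in sources:
--         for t in s.get("topics", []):
--             if t not in seen:
--                 seen.add(t)
--                 result.append(t)
--     return sorted(result)
-- ===== SOURCE B (Python) =====
-- def _all_topics(sources: list[dict[str, "Any"]]) -> list[str]:
--     """Collect unique topic ids from sources (sort first, then drop adjacent duplicates)."""
--     topics = [t for s in sources for t in s.get("topics", [])]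
--     topics.sort()
--     result: list[str] = []
--     for t in topics:
--         if not result or result[-1] != t:
--             result.append(t)
--     return result
-- ===== Notes on version B (the rewrite author's own statement) =====
-- stated objective: alternative
-- what changed: Replaces the seen-set first-occurrence dedup followed by a final sort with flatten, sort, then a single adjacent-duplicate-removal pass (no set at all).
import Mathlib
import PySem

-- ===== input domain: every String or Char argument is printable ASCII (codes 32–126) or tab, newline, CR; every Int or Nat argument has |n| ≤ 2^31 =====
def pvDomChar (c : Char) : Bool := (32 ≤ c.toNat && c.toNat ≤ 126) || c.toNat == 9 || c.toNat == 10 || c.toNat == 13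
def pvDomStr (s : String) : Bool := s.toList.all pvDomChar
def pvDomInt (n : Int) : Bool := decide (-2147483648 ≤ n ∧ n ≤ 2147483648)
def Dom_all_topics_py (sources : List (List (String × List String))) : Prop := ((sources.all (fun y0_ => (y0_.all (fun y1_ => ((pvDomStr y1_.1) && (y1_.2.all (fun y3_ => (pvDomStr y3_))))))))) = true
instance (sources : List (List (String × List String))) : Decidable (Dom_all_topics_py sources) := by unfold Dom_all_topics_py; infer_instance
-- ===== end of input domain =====

-- B sorts the flattened topics then removes adjacent duplicates in one pass, instead of A's seen-set dedup followed by a final sort.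

-- ===== PORT A =====
def all_topics_py (sources : List (List (String × List String))) : List String :=
  let st := sources.foldl
    (fun st s =>
      (PySem.Dict.getD (PySem.Dict.mk s) "topics" []).foldl
        (fun st t =>
          if PySem.Set.contains st.1 t then st
          else (PySem.Set.add st.1 t, st.2 ++ [t]))
        st)
    (PySem.Set.empty, [])
  PySem.List.sorted st.2 (fun x => x) false

-- ===== PORT B =====
def all_topics_py_alt (sources : List (List (String × List String))) : List String :=
  let topics := sources.flatMap (fun s => PySem.Dict.getD (PySem.Dict.mk s) "topics" [])
  let srt := PySem.List.sorted topics (fun x => x) false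
  srt.foldl (fun res t => if res.getLast? = some t then res else res ++ [t]) []

-- ===== PRECONDITION & SPEC =====
def Spec_all_topics_py (sources : List (List (String × List String))) (out : List String) : Prop := out = all_topics_py_alt sources
instance (sources : List (List (String × List String))) (out : List String) : Decidable (Spec_all_topics_py sources out) := by unfold Spec_all_topics_py; infer_instance

-- ===== CLAIM (what is proved, stated in full; the proofs are below) =====
def Claim_equal_all_topics_py : Prop := ∀ (sources : List (List (String × List String))), Dom_all_topics_py sources → Spec_all_topics_py sources (all_topics_py sources)

-- ===== LEMMAS AND PROOFS =====

-- A's nested loop with the seen-set equals building set(flat) when seen and result start equal.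
theorem afold_eq (l : List String) (s : List String) (h : True) :
    l.foldl (fun st t => if PySem.Set.contains st.1 t then st
                         else (PySem.Set.add st.1 t, st.2 ++ [t])) (s, s)
      = (l.foldl PySem.Set.add s, l.foldl PySem.Set.add s) := by
  induction l generalizing s with
  | nil => rfl
  | cons t rest ih =>
    by_cases hm : t ∈ s
    · have hc : PySem.Set.contains s t = true := (PySem.Set.contains_iff s t).mpr hm
      simp only [List.foldl_cons, hc, if_true, PySem.Set.add_of_mem hm]
      exact ih s
    · have hc : PySem.Set.contains s t = false :=
        Bool.eq_false_iff.mpr (fun h => hm ((PySem.Set.contains_iff s t).mp h))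
      simp only [List.foldl_cons, hc, Bool.false_eq_true, if_false, PySem.Set.add_of_not_mem hm]
      exact ih (s ++ [t])

-- every member of a strictly increasing list is ≤ its last element
theorem mem_le_getLast {l : List String} {m x : String}
    (hp : l.Pairwise (· < ·)) (hl : l.getLast? = some m) (hx : x ∈ l) : x ≤ m := by
  induction l with
  | nil => cases hx
  | cons a t ih =>
    cases t with
    | nil =>
      simp only [List.getLast?_singleton, Option.some.injEq] at hl
      simp only [List.mem_singleton] at hx
      exact le_of_eq (by rw [hx, hl])
    | cons b t' =>
      rw [List.getLast?_cons_cons] at hl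
      rcases List.mem_cons.mp hx with rfl | hx
      · have hb : x < m := by
          have : m ∈ b :: t' := List.mem_of_getLast? hl
          exact (List.pairwise_cons.mp hp).1 m this
        exact le_of_lt hb
      · exact ih (List.pairwise_cons.mp hp).2 hl hx

-- B's adjacent-dedup fold over a ≤-sorted list: strictly increasing output, membership preserved
theorem bfold_spec (l acc : List String)
    (hacc : acc.Pairwise (· < ·))
    (hl : l.Pairwise (· ≤ ·))
    (hcross : ∀ x ∈ acc, ∀ y ∈ l, x ≤ y) :
    (l.foldl (fun res t => if res.getLast? = some t then res else res ++ [t]) acc).Pairwise (· < ·)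
    ∧ ∀ x, (x ∈ l.foldl (fun res t => if res.getLast? = some t then res else res ++ [t]) acc
            ↔ x ∈ acc ∨ x ∈ l) := by
  induction l generalizing acc with
  | nil => exact ⟨hacc, fun x => by simp⟩
  | cons t rest ih =>
    obtain ⟨hle, hrest⟩ := List.pairwise_cons.mp hl
    simp only [List.foldl_cons]
    by_cases hlast : acc.getLast? = some t
    · rw [if_pos hlast]
      have ht : t ∈ acc := List.mem_of_getLast? hlast
      have := ih acc hacc hrest
        (fun x hx y hy => le_trans (hcross x hx t (List.mem_cons_self))
          (hle y hy))
      refine ⟨this.1, fun x => ?_⟩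
      rw [(this.2 x)]
      constructor
      · rintro (h | h)
        · exact Or.inl h
        · exact Or.inr (List.mem_cons_of_mem _ h)
      · rintro (h | h)
        · exact Or.inl h
        · rcases List.mem_cons.mp h with h | h
          · exact Or.inl (h ▸ ht)
          · exact Or.inr h
    · rw [if_neg hlast]
      have hlt : ∀ x ∈ acc, x < t := by
        intro x hx
        rcases hlx : acc.getLast? with _ | m
        · cases acc with
          | nil => cases hx
          | cons a t' => simp [List.getLast?_eq_none_iff] at hlx
        · have hxm : x ≤ m := mem_le_getLast hacc hlx hx
          have hmt : m ≤ t := hcross m (List.mem_of_getLast? hlx) t List.mem_cons_self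
          have : m ≠ t := fun he => hlast (he ▸ hlx)
          exact lt_of_le_of_lt hxm (lt_of_le_of_ne hmt this)
      have hacc' : (acc ++ [t]).Pairwise (· < ·) := by
        rw [List.pairwise_append]
        exact ⟨hacc, List.pairwise_singleton _ _, fun x hx y hy => by
          rw [List.mem_singleton] at hy; exact hy ▸ hlt x hx⟩
      have hcross' : ∀ x ∈ acc ++ [t], ∀ y ∈ rest, x ≤ y := by
        intro x hx y hy
        rcases List.mem_append.mp hx with h | h
        · exact hcross x h y (List.mem_cons_of_mem _ hy)
        · rw [List.mem_singleton] at h; exact h ▸ hle y hy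
      have := ih (acc ++ [t]) hacc' hrest hcross'
      refine ⟨this.1, fun x => ?_⟩
      rw [this.2 x]
      simp [List.mem_append, List.mem_cons]
      tauto

-- ===== VERDICT (by name: the statement is the Claim_ definition above) =====
theorem all_topics_py_spec : Claim_equal_all_topics_py := by
  intro sources _
  unfold Spec_all_topics_py all_topics_py all_topics_py_alt
  simp only []
  set flat := sources.flatMap (fun s => PySem.Dict.getD (PySem.Dict.mk s) "topics" []) with hflat
  -- A's accumulator: nested fold = fold over the flattened list
  have hA : (sources.foldl
      (fun st s =>
        (PySem.Dict.getD (PySem.Dict.mk s) "topics" []).foldl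
          (fun st t => if PySem.Set.contains st.1 t then st
                       else (PySem.Set.add st.1 t, st.2 ++ [t])) st)
      (PySem.Set.empty, [])).2 = PySem.Set.ofList flat := by
    rw [hflat, ← List.foldl_flatMap]
    rw [show (PySem.Set.empty, ([] : List String)) = (([] : List String), ([] : List String)) from rfl]
    rw [afold_eq _ _ trivial]
    rw [PySem.Set.ofList_eq_foldl]
  rw [hA]
  -- B's output is strictly increasing and a permutation of set(flat)
  set srt := PySem.List.sorted flat (fun x => x) false with hsrt
  have hsorted : srt.Pairwise (· ≤ ·) := by
    have := PySem.List.sorted_pairwise flat (fun x => x) (κ := String)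
    simpa using this
  have hb := bfold_spec srt [] (List.Pairwise.nil) hsorted (by intro x hx; cases hx)
  set B := srt.foldl (fun res t => if res.getLast? = some t then res else res ++ [t]) [] with hB
  have hmemB : ∀ x, x ∈ B ↔ x ∈ flat := by
    intro x
    rw [hb.2 x]
    simp [hsrt, PySem.List.mem_sorted]
  have hperm : B.Perm (PySem.Set.ofList flat) := by
    rw [List.perm_ext_iff_of_nodup hb.1.nodup (PySem.Set.nodup_ofList flat)]
    intro x
    rw [hmemB x, PySem.Set.mem_ofList]
  exact PySem.List.sorted_eq_of_perm_of_pairwise_lt _ _ _ hperm hb.1
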